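-- pv_equiv track=rewrite | github.com/AriSpiesberger/Soft-Contamination-Prevelance | pipeline/stages/02_chunk_and_sample.py | split_math_block
-- ===== SOURCE A (Python) =====
-- def split_math_block(text):
--     """
--     Split math / LaTeX content on double-newlines **without** breaking
--     ``\\begin{…}…\\end{…}`` environments.
--
--     Paragraphs inside an open environment are merged back together.
--     """
--     raw_parts = text.split("\n\n")
--     chunks = []
--     pending = []
--     depth = 0
--
--     for part in raw_parts:
--         pending.append(part)
--         depth += part.count("\\begin{") - part.count("\\end{")
--         depth = max(0, depth)  # don't go negative on malformed input
--
--         if depth == 0: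
--             merged = "\n\n".join(pending).strip()
--             if merged:
--                 chunks.append(merged)
--             pending = []
--
--     # Flush anything left inside an unclosed environment
--     if pending:
--         merged = "\n\n".join(pending).strip()
--         if merged:
--             chunks.append(merged)
--
--     return chunks if chunks else [text.strip()]
-- ===== SOURCE B (Python) =====
-- def split_math_block(text):
--     """Two-pass rewrite: first find group boundaries, then build chunks.
--
--     Pass 1 walks the paragraphs once keeping a clamped environment depth and
--     records the end index of every balanced group (plus the unclosed tail).
--     Pass 2 slices the paragraph list at those boundaries and keeps the
--     non-empty stripped joins.
--     """
--     raw_parts = text.split("\n\n")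
--     n = len(raw_parts)
--     ends = []
--     depth = 0
--     for i, part in enumerate(raw_parts):
--         depth = max(0, depth + part.count("\\begin{") - part.count("\\end{"))
--         if depth == 0:
--             ends.append(i + 1)
--     if not ends or ends[-1] != n:
--         ends.append(n)
--     chunks = [m
--               for a, b in zip([0] + ends[:-1], ends)
--               for m in ["\n\n".join(raw_parts[a:b]).strip()]
--               if m]
--     return chunks or [text.strip()]
-- ===== Notes on version B (the rewrite author's own statement) =====
-- stated objective: alternative
-- what changed: Replaces A's single streaming accumulate-and-flush loop (pending list + in-loop appends) by two separately shaped passes: pass 1 walks the paragraphs once recording the end index of every balanced group (plus the unclosed tail), pass 2 slices the paragraph list at those boundaries and keeps the non-empty stripped joins via a comprehension.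
import Mathlib
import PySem

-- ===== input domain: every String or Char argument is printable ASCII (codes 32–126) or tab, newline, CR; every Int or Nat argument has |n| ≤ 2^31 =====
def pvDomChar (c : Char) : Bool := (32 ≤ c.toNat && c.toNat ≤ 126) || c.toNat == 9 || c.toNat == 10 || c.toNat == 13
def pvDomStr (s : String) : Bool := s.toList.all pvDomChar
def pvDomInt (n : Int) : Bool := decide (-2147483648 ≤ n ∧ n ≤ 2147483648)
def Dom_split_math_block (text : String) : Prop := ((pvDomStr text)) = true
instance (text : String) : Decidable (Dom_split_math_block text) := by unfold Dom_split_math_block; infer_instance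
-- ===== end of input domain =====

-- B finds balanced-group boundary indices in one pass and slices/joins in a second pass,
-- instead of A's single streaming loop with a pending accumulator; same cost, alternative decomposition.

-- ===== PORT A =====
-- loop body of A's 'for part in raw_parts'
def pvStepA (st : List String × List String × Int) (part : String) : List String × List String × Int :=
  let pending := st.2.1 ++ [part]
  let depth := st.2.2 + ((PySem.Str.count part "\\begin{" : Int) - (PySem.Str.count part "\\end{" : Int))
  let depth := max 0 depth
  if depth = 0 then
    let merged := PySem.Str.strip (PySem.Str.join "\n\n" pending)
    (if merged = "" then st.1 else st.1 ++ [merged], ([] : List String), depth)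
  else
    (st.1, pending, depth)

def split_math_block (text : String) : List String :=
  let raw_parts := (PySem.Str.split? text "\n\n").getD []   -- sep ≠ "": split? is some
  let st := raw_parts.foldl pvStepA ([], [], 0)
  let chunks :=
    if st.2.1 ≠ [] then
      let merged := PySem.Str.strip (PySem.Str.join "\n\n" st.2.1)
      if merged = "" then st.1 else st.1 ++ [merged]
    else st.1
  if chunks = [] then [PySem.Str.strip text] else chunks

-- ===== PORT B =====
-- loop body of B's boundary-recording pass (over enumerate(raw_parts))
def pvStepB (st : List Int × Int) (ip : Int × String) : List Int × Int :=
  let depth := max 0 (st.2 + ((PySem.Str.count ip.2 "\\begin{" : Int) - (PySem.Str.count ip.2 "\\end{" : Int)))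
  if depth = 0 then (st.1 ++ [ip.1 + 1], depth) else (st.1, depth)

def split_math_block_alt (text : String) : List String :=
  let raw_parts := (PySem.Str.split? text "\n\n").getD []   -- sep ≠ "": split? is some
  let n : Int := raw_parts.length
  let ends := ((PySem.List.enumerate raw_parts).foldl pvStepB ([], 0)).1
  let ends := if ends = [] ∨ ends.getLast? ≠ some n then ends ++ [n] else ends
  let chunks := ((0 :: ends.dropLast).zip ends).flatMap (fun ab =>
    let m := PySem.Str.strip (PySem.Str.join "\n\n" (PySem.List.slice raw_parts (some ab.1) (some ab.2)))
    if m = "" then [] else [m])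
  if chunks = [] then [PySem.Str.strip text] else chunks

-- ===== PRECONDITION & SPEC =====
def Spec_split_math_block (text : String) (out : List String) : Prop := out = split_math_block_alt text
instance (text : String) (out : List String) : Decidable (Spec_split_math_block text out) := by unfold Spec_split_math_block; infer_instance

-- ===== CLAIM (what is proved, stated in full; the proofs are below) =====
def Claim_equal_split_math_block : Prop := ∀ (text : String), Dom_split_math_block text → Spec_split_math_block text (split_math_block text)

-- ===== LEMMAS AND PROOFS =====

-- net '\begin{'/'\end{' balance of one paragraph
def pvC (p : String) : Int := (PySem.Str.count p "\\begin{" : Int) - (PySem.Str.count p "\\end{" : Int)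

-- shortest prefix whose clamped depth returns to 0 (or everything), with the rest
def pvTakeGroup : Int → List String → List String × List String
  | _, [] => ([], [])
  | d, p :: r =>
    let d' := max 0 (d + pvC p)
    if d' = 0 then ([p], r)
    else
      let gr := pvTakeGroup d' r
      (p :: gr.1, gr.2)

theorem pvTakeGroup_snd_le (d : Int) (ps : List String) : (pvTakeGroup d ps).2.length ≤ ps.length := by
  induction ps generalizing d with
  | nil => simp [pvTakeGroup]
  | cons p r ih =>
    simp only [pvTakeGroup]
    split
    · simp
    · simpa using Nat.le_succ_of_le (ih _)

theorem pvTakeGroup_snd_lt (d : Int) (ps : List String) (h : ps ≠ []) :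
    (pvTakeGroup d ps).2.length < ps.length := by
  cases ps with
  | nil => exact absurd rfl h
  | cons p r =>
    simp only [pvTakeGroup]
    split
    · simp
    · simpa using Nat.lt_succ_of_le (pvTakeGroup_snd_le _ r)

def pvGroups : List String → List (List String)
  | [] => []
  | p :: r =>
    (pvTakeGroup 0 (p :: r)).1 :: pvGroups (pvTakeGroup 0 (p :: r)).2
  termination_by ps => ps.length
  decreasing_by exact pvTakeGroup_snd_lt 0 (p :: r) (by simp)

def pvStrip1 (ps : List String) : List String :=
  if PySem.Str.strip (PySem.Str.join "\n\n" ps) = "" then []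
  else [PySem.Str.strip (PySem.Str.join "\n\n" ps)]

def pvChunks (ps : List String) : List String := (pvGroups ps).flatMap pvStrip1

def pvCloses : Int → List String → Bool
  | _, [] => false
  | d, p :: r => (max 0 (d + pvC p) == 0) || pvCloses (max 0 (d + pvC p)) r

def pvBnds : Int → Int → List String → List Int
  | _, _, [] => []
  | s, d, p :: r =>
    let d' := max 0 (d + pvC p)
    if d' = 0 then (s + 1) :: pvBnds (s + 1) 0 r else pvBnds (s + 1) d' r

def pvAdjust (e : List Int) (n : Int) : List Int :=
  if e = [] ∨ e.getLast? ≠ some n then e ++ [n] else e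

def pvSegChunks (orig : List String) (off : Int) (e : List Int) : List String :=
  ((off :: e.dropLast).zip e).flatMap
    (fun ab => pvStrip1 (PySem.List.slice orig (some ab.1) (some ab.2)))

-- tail of A's result (the value the flush produces), expressed structurally
def pvBg (pending : List String) (d : Int) (parts : List String) : List String :=
  match parts with
  | [] => pvStrip1 pending
  | _ :: _ => pvStrip1 (pending ++ (pvTakeGroup d parts).1) ++ pvChunks (pvTakeGroup d parts).2

theorem pvStrip1_nil : pvStrip1 [] = [] := by decide

theorem pvAppendStrip (cs ps : List String) :
    (if PySem.Str.strip (PySem.Str.join "\n\n" ps) = "" then cs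
     else cs ++ [PySem.Str.strip (PySem.Str.join "\n\n" ps)]) = cs ++ pvStrip1 ps := by
  unfold pvStrip1; split <;> simp

theorem pvChunks_eq_bg (ps : List String) : pvBg [] 0 ps = pvChunks ps := by
  cases ps with
  | nil => simp [pvBg, pvChunks, pvGroups, pvStrip1_nil]
  | cons p r => simp [pvBg, pvChunks, pvGroups]

theorem pvFoldlA (parts : List String) : ∀ (chunks pending : List String) (d : Int),
    (parts.foldl pvStepA (chunks, pending, d)).1 ++
      pvStrip1 (parts.foldl pvStepA (chunks, pending, d)).2.1
    = chunks ++ pvBg pending d parts := by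
  induction parts with
  | nil => intro chunks pending d; simp [pvBg]
  | cons p r ih =>
    intro chunks pending d
    rw [List.foldl_cons]
    by_cases h : max 0 (d + pvC p) = 0
    · have h' := h
      simp only [pvC] at h'
      have hstep : pvStepA (chunks, pending, d) p = (chunks ++ pvStrip1 (pending ++ [p]), [], 0) := by
        simp only [pvStepA]
        rw [if_pos h', pvAppendStrip, h']
      have hg : pvTakeGroup d (p :: r) = ([p], r) := by
        simp only [pvTakeGroup]; rw [if_pos h]
      have hBg : pvBg pending d (p :: r) = pvStrip1 (pending ++ [p]) ++ pvChunks r := by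
        simp only [pvBg, hg]
      rw [hstep, ih, pvChunks_eq_bg, hBg, List.append_assoc]
    · have h' := h
      simp only [pvC] at h'
      have hstep : pvStepA (chunks, pending, d) p = (chunks, pending ++ [p], max 0 (d + pvC p)) := by
        simp only [pvStepA, pvC]
        rw [if_neg h']
      have hg : pvTakeGroup d (p :: r) =
          (p :: (pvTakeGroup (max 0 (d + pvC p)) r).1, (pvTakeGroup (max 0 (d + pvC p)) r).2) := by
        simp only [pvTakeGroup]; rw [if_neg h]
      have hBg : pvBg (pending ++ [p]) (max 0 (d + pvC p)) r = pvBg pending d (p :: r) := by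
        cases r with
        | nil =>
          simp only [pvBg, pvTakeGroup]
          simp [pvChunks, pvGroups]
        | cons q t =>
          simp only [pvBg, hg]
          simp [List.append_assoc]
      rw [hstep, ih, hBg]

theorem pvFoldlB (parts : List String) : ∀ (s : Int) (acc : List Int) (d : Int),
    ((PySem.List.enumerate parts s).foldl pvStepB (acc, d)).1 = acc ++ pvBnds s d parts := by
  induction parts with
  | nil => intro s acc d; simp [PySem.List.enumerate_nil, pvBnds]
  | cons p r ih =>
    intro s acc d
    rw [PySem.List.enumerate_cons, List.foldl_cons]
    by_cases h : max 0 (d + pvC p) = 0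
    · have h' := h
      simp only [pvC] at h'
      have hstep : pvStepB (acc, d) (s, p) = (acc ++ [s + 1], max 0 (d + pvC p)) := by
        simp only [pvStepB, pvC]
        rw [if_pos h']
      have hb : pvBnds s d (p :: r) = (s + 1) :: pvBnds (s + 1) 0 r := by
        simp only [pvBnds]; rw [if_pos h]
      rw [hstep, h, ih, hb]
      simp
    · have h' := h
      simp only [pvC] at h'
      have hstep : pvStepB (acc, d) (s, p) = (acc, max 0 (d + pvC p)) := by
        simp only [pvStepB, pvC]
        rw [if_neg h']
      have hb : pvBnds s d (p :: r) = pvBnds (s + 1) (max 0 (d + pvC p)) r := by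
        simp only [pvBnds]; rw [if_neg h]
      rw [hstep, ih, hb]

theorem pvTakeGroup_append (d : Int) (ps : List String) :
    (pvTakeGroup d ps).1 ++ (pvTakeGroup d ps).2 = ps := by
  induction ps generalizing d with
  | nil => simp [pvTakeGroup]
  | cons p r ih =>
    simp only [pvTakeGroup]
    split
    · simp
    · simpa using ih _

theorem pvTakeGroup_not_closes (d : Int) (ps : List String) (h : pvCloses d ps = false) :
    pvTakeGroup d ps = (ps, []) := by
  induction ps generalizing d with
  | nil => simp [pvTakeGroup]
  | cons p r ih =>
    simp only [pvCloses, Bool.or_eq_false_iff, beq_eq_false_iff_ne] at h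
    simp only [pvTakeGroup]
    rw [if_neg h.1, ih _ h.2]

theorem pvBnds_closes (ps : List String) : ∀ (s d : Int),
    pvBnds s d ps =
      if pvCloses d ps then
        (s + ((pvTakeGroup d ps).1.length : Int)) ::
          pvBnds (s + ((pvTakeGroup d ps).1.length : Int)) 0 (pvTakeGroup d ps).2
      else [] := by
  induction ps with
  | nil => intro s d; simp [pvBnds, pvCloses]
  | cons p r ih =>
    intro s d
    by_cases h : max 0 (d + pvC p) = 0
    · have hg : pvTakeGroup d (p :: r) = ([p], r) := by
        simp only [pvTakeGroup]; rw [if_pos h]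
      have hc : pvCloses d (p :: r) = true := by
        simp [pvCloses, h]
      have hb : pvBnds s d (p :: r) = (s + 1) :: pvBnds (s + 1) 0 r := by
        simp only [pvBnds]; rw [if_pos h]
      rw [hb, hg, hc]
      norm_num
    · have hg : pvTakeGroup d (p :: r) =
          (p :: (pvTakeGroup (max 0 (d + pvC p)) r).1, (pvTakeGroup (max 0 (d + pvC p)) r).2) := by
        simp only [pvTakeGroup]; rw [if_neg h]
      have hc : pvCloses d (p :: r) = pvCloses (max 0 (d + pvC p)) r := by
        simp [pvCloses, h]
      have hb : pvBnds s d (p :: r) = pvBnds (s + 1) (max 0 (d + pvC p)) r := by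
        simp only [pvBnds]; rw [if_neg h]
      rw [hb, ih, hg, hc]
      cases hcl : pvCloses (max 0 (d + pvC p)) r with
      | false => simp
      | true =>
        simp only [if_true, List.length_cons]
        have harith : s + 1 + ((pvTakeGroup (max 0 (d + pvC p)) r).1.length : Int)
            = s + (((pvTakeGroup (max 0 (d + pvC p)) r).1.length + 1 : Nat) : Int) := by
          push_cast; ring
        rw [harith]

theorem pvChunks_not_closes (ps : List String) (h : pvCloses 0 ps = false) :
    pvChunks ps = pvStrip1 ps := by
  cases ps with
  | nil => simp [pvChunks, pvGroups, pvStrip1_nil]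
  | cons p r =>
    rw [pvChunks, pvGroups, pvTakeGroup_not_closes 0 (p :: r) h]
    simp [pvGroups]

theorem pvAdjust_ne_nil (e : List Int) (n : Int) : pvAdjust e n ≠ [] := by
  unfold pvAdjust; split <;> simp_all

theorem pvAdjust_cons (x : Int) (e : List Int) (n : Int) (h : e ≠ []) :
    pvAdjust (x :: e) n = x :: pvAdjust e n := by
  obtain ⟨b, bs, rfl⟩ := List.exists_cons_of_ne_nil h
  unfold pvAdjust
  simp only [List.getLast?_cons_cons]
  split <;> simp_all

theorem pvSliceFull (pre rest : List String) :
    PySem.List.slice (pre ++ rest) (some (pre.length : Int)) (some (((pre ++ rest).length : Nat) : Int)) = rest := by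
  rw [PySem.List.slice_toNat _ (Int.natCast_nonneg _) (Int.natCast_nonneg _)]
  have h1 : ((((pre ++ rest).length : Nat) : Int)).toNat = pre.length + rest.length := by
    rw [List.length_append]; omega
  have h2 : ((pre.length : Int)).toNat = pre.length := by simp
  rw [h1, h2, List.drop_left]
  have h3 : pre.length + rest.length - pre.length = rest.length := by omega
  rw [h3, List.take_length]

theorem pvSlicePrefix (pre g tl : List String) :
    PySem.List.slice (pre ++ (g ++ tl)) (some (pre.length : Int))
      (some ((pre.length : Int) + (g.length : Int))) = g := by
  rw [PySem.List.slice_toNat _ (Int.natCast_nonneg _) (by positivity)]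
  have h1 : ((pre.length : Int) + (g.length : Int)).toNat = pre.length + g.length := by omega
  have h2 : ((pre.length : Int)).toNat = pre.length := by omega
  rw [h1, h2, List.drop_left]
  have h3 : pre.length + g.length - pre.length = g.length := by omega
  rw [h3, List.take_left]

theorem pvSegChunks_single (orig : List String) (off x : Int) :
    pvSegChunks orig off [x] = pvStrip1 (PySem.List.slice orig (some off) (some x)) := by
  simp [pvSegChunks]

theorem pvSegChunks_cons (orig : List String) (off x : Int) (e : List Int) (h : e ≠ []) :
    pvSegChunks orig off (x :: e)
      = pvStrip1 (PySem.List.slice orig (some off) (some x)) ++ pvSegChunks orig x e := by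
  obtain ⟨b, bs, rfl⟩ := List.exists_cons_of_ne_nil h
  simp [pvSegChunks]

theorem pvChunks_group (rest : List String) (h : rest ≠ []) :
    pvChunks rest = pvStrip1 (pvTakeGroup 0 rest).1 ++ pvChunks (pvTakeGroup 0 rest).2 := by
  obtain ⟨p, r, rfl⟩ := List.exists_cons_of_ne_nil h
  rw [pvChunks, pvGroups]
  simp [pvChunks]

theorem pvAdjust_nil (n : Int) : pvAdjust [] n = [n] := by
  unfold pvAdjust; simp

theorem pvAdjust_single_self (n : Int) : pvAdjust [n] n = [n] := by
  unfold pvAdjust; simp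

theorem pvAdjust_single_ne (x n : Int) (h : x ≠ n) : pvAdjust [x] n = [x, n] := by
  unfold pvAdjust; simp [h]

theorem pvSegNotCloses (rest pre : List String) (hc : pvCloses 0 rest = false) :
    pvSegChunks (pre ++ rest) (pre.length : Int)
      (pvAdjust (pvBnds (pre.length : Int) 0 rest) (((pre ++ rest).length : Nat) : Int))
    = pvChunks rest := by
  rw [pvBnds_closes, hc]
  simp only [if_false, Bool.false_eq_true, pvAdjust_nil]
  rw [pvSegChunks_single, pvSliceFull, pvChunks_not_closes rest hc]

theorem pvSegMain (N : Nat) : ∀ (rest pre : List String), rest.length ≤ N →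
    pvSegChunks (pre ++ rest) (pre.length : Int)
      (pvAdjust (pvBnds (pre.length : Int) 0 rest) (((pre ++ rest).length : Nat) : Int))
    = pvChunks rest := by
  induction N with
  | zero =>
    intro rest pre hlen
    have hnil : rest = [] := by
      cases rest with
      | nil => rfl
      | cons a b => simp at hlen
    subst hnil
    exact pvSegNotCloses [] pre rfl
  | succ n ih =>
    intro rest pre hlen
    cases hc : pvCloses 0 rest with
    | false => exact pvSegNotCloses rest pre hc
    | true =>
      have hrest : rest ≠ [] := by
        intro h; subst h; simp [pvCloses] at hc
      obtain ⟨g, tl, hgt⟩ : ∃ a b, pvTakeGroup 0 rest = (a, b) := ⟨_, _, rfl⟩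
      have hsplit : g ++ tl = rest := by
        rw [← pvTakeGroup_append 0 rest, hgt]
      have horig : pre ++ rest = (pre ++ g) ++ tl := by
        rw [← hsplit, List.append_assoc]
      have hoff : (pre.length : Int) + (g.length : Int) = (((pre ++ g).length : Nat) : Int) := by
        simp [List.length_append]
      have hbnds : pvBnds (pre.length : Int) 0 rest =
          ((pre.length : Int) + (g.length : Int)) ::
            pvBnds ((pre.length : Int) + (g.length : Int)) 0 tl := by
        rw [pvBnds_closes, hc, hgt]
        simp
      have htllen : tl.length ≤ n := by
        have h := pvTakeGroup_snd_lt 0 rest hrest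
        rw [hgt] at h
        simp at h
        omega
      have hgroup : pvChunks rest = pvStrip1 g ++ pvChunks tl := by
        rw [pvChunks_group rest hrest, hgt]
      have hsliceg : PySem.List.slice (pre ++ rest) (some (pre.length : Int))
          (some ((pre.length : Int) + (g.length : Int))) = g := by
        rw [horig, List.append_assoc, pvSlicePrefix]
      have hslicetl : PySem.List.slice (pre ++ rest)
          (some ((pre.length : Int) + (g.length : Int)))
          (some (((pre ++ rest).length : Nat) : Int)) = tl := by
        rw [horig, hoff]
        exact pvSliceFull (pre ++ g) tl
      rw [hbnds]
      cases hB : pvBnds ((pre.length : Int) + (g.length : Int)) 0 tl with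
      | nil =>
        have hct : pvCloses 0 tl = false := by
          cases h2 : pvCloses 0 tl with
          | false => rfl
          | true => rw [pvBnds_closes, h2] at hB; simp at hB
        have hchtl : pvChunks tl = pvStrip1 tl := pvChunks_not_closes tl hct
        by_cases ht : tl = []
        · subst ht
          have hgr : g = rest := by simpa using hsplit
          have hn : (pre.length : Int) + (g.length : Int) = (((pre ++ rest).length : Nat) : Int) := by
            rw [hgr]
            simp [List.length_append]
          rw [hn, pvAdjust_single_self, pvSegChunks_single, pvSliceFull, hgroup, hgr]
          simp [pvChunks, pvGroups]
        · have hne : (pre.length : Int) + (g.length : Int) ≠ (((pre ++ rest).length : Nat) : Int) := by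
            have h1 : 0 < tl.length := List.length_pos_iff.mpr ht
            have h2 : rest.length = g.length + tl.length := by
              rw [← hsplit, List.length_append]
            simp only [List.length_append]
            omega
          rw [pvAdjust_single_ne _ _ hne,
              pvSegChunks_cons _ _ _ _ (by simp), pvSegChunks_single, hsliceg, hslicetl,
              hgroup, hchtl]
      | cons b bs =>
        rw [pvAdjust_cons _ _ _ (by simp),
            pvSegChunks_cons _ _ _ _ (pvAdjust_ne_nil _ _), hsliceg]
        have hrec := ih tl (pre ++ g) htllen
        rw [← horig, ← hoff, hB] at hrec
        rw [hrec, hgroup]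

-- ===== VERDICT (by name: the statement is the Claim_ definition above) =====
theorem pvChunksA (raw : List String) :
    (if (raw.foldl pvStepA ([], [], 0)).2.1 ≠ [] then
      if PySem.Str.strip (PySem.Str.join "\n\n" (raw.foldl pvStepA ([], [], 0)).2.1) = "" then
        (raw.foldl pvStepA ([], [], 0)).1
      else (raw.foldl pvStepA ([], [], 0)).1 ++
        [PySem.Str.strip (PySem.Str.join "\n\n" (raw.foldl pvStepA ([], [], 0)).2.1)]
     else (raw.foldl pvStepA ([], [], 0)).1) = pvChunks raw := by
  by_cases hp : (raw.foldl pvStepA ([], [], 0)).2.1 = []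
  · rw [if_neg (by simp [hp])]
    have h := pvFoldlA raw [] [] 0
    rw [hp, pvStrip1_nil, List.append_nil] at h
    rw [h, List.nil_append, pvChunks_eq_bg]
  · rw [if_pos hp, pvAppendStrip]
    have h := pvFoldlA raw [] [] 0
    rw [h, List.nil_append, pvChunks_eq_bg]

theorem pvChunksB (raw : List String) :
    pvSegChunks raw 0
      (pvAdjust (((PySem.List.enumerate raw).foldl pvStepB ([], 0)).1) ((raw.length : Nat) : Int))
    = pvChunks raw := by
  have h := pvFoldlB raw 0 [] 0
  rw [h, List.nil_append]
  have h2 := pvSegMain raw.length raw [] le_rfl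
  simpa using h2

theorem split_math_block_spec : Claim_equal_split_math_block := by
  unfold Claim_equal_split_math_block
  intro text _
  unfold Spec_split_math_block split_math_block split_math_block_alt
  have hA := pvChunksA ((PySem.Str.split? text "\n\n").getD [])
  have hB := pvChunksB ((PySem.Str.split? text "\n\n").getD [])
  simp only [pvSegChunks, pvAdjust, pvStrip1] at hB
  dsimp only
  rw [hA, hB]
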